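-- pv_equiv track=rewrite | github.com/badgersky/twofish_algorithm | twofish.py | pad_input
-- ===== SOURCE A (Python) =====
-- def pad_input(text: str) -> tuple[str, int]:
--     b = str_to_bin(text)
--     padding = 0
--
--     if len(b) % 128 != 0:
--         while len(b) % 128 != 0:
--             b += '0'
--             padding += 1
--
--     return b, padding
--
-- def str_to_bin(text: str) -> str:
--     binary = []
--
--     for char in text:
--         binary.append(bin(ord(char))[2:].zfill(8))
--
--     return ''.join(binary)
-- ===== SOURCE B (Python) =====
-- def pad_input(text: str) -> tuple[str, int]:
--     b = ''.join(f'{ord(c):08b}' for c in text)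
--     padding = (128 - len(b) % 128) % 128
--     return b + '0' * padding, padding
-- ===== Notes on version B (the rewrite author's own statement) =====
-- stated objective: simpler
-- what changed: The character-at-a-time padding while loop is replaced by a closed-form padding count (128 - length mod 128) mod 128 with a single concatenation, and the per-char bin()[2:].zfill(8) list-append loop becomes one join over formatted chars.
import Mathlib
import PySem

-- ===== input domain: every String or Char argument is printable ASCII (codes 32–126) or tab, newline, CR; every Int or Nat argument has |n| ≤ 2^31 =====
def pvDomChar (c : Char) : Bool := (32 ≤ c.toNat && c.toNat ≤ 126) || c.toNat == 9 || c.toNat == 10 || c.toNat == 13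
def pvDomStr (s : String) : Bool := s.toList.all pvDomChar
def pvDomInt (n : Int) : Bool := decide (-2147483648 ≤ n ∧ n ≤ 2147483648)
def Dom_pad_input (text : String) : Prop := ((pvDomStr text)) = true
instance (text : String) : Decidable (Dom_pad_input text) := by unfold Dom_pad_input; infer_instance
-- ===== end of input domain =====

-- B replaces A's character-at-a-time padding while loop by a closed-form padding count and one concatenation (objective: simpler).

-- ===== PORT A =====
-- bin(n)[2:] for n ≥ 0 : binary digits, msb first (bin(0)[2:] = "0")
def pvBinGo : Nat → Nat → List Char
  | 0, _ => []
  | fuel + 1, n =>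
    if n = 0 then []
    else pvBinGo fuel (n / 2) ++ [if n % 2 = 1 then '1' else '0']

def pvBin (n : Nat) : List Char := if n = 0 then ['0'] else pvBinGo n n

-- s.zfill(8)
def pvZfill8 (s : List Char) : List Char := List.replicate (8 - s.length) '0' ++ s

-- str_to_bin: A appends bin(ord(char))[2:].zfill(8) per char into a list, then joins
def pv_str_to_bin (text : List Char) : List Char :=
  (text.foldl (fun acc c => acc ++ [pvZfill8 (pvBin c.toNat)]) []).flatten

-- the while loop: append a zero character and bump padding until length is a multiple of 128
def pvPadLoop (b : List Char) (p : Int) : List Char × Int :=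
  if b.length % 128 = 0 then (b, p)
  else pvPadLoop (b ++ ['0']) (p + 1)
  termination_by (128 - b.length % 128) % 128
  decreasing_by simp only [List.length_append, List.length_cons, List.length_nil]; omega

def pad_input (text : String) : String × Int :=
  let b := pv_str_to_bin text.toList
  if b.length % 128 ≠ 0 then
    let r := pvPadLoop b 0
    (String.ofList r.1, r.2)
  else
    (String.ofList b, 0)

-- ===== PORT B =====
-- f'{ord(c):08b}' : binary digits of ord(c) left-padded with '0' to width 8
def pvFmt08b (n : Nat) : List Char :=
  let ds := Nat.toDigits 2 n
  List.replicate (8 - ds.length) '0' ++ ds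

def pad_input_alt (text : String) : String × Int :=
  let b := (text.toList.map (fun c => pvFmt08b c.toNat)).flatten
  let padding := (128 - b.length % 128) % 128
  (String.ofList (b ++ List.replicate padding '0'), (padding : Int))

-- ===== PRECONDITION & SPEC =====
def Spec_pad_input (text : String) (out : String × Int) : Prop := out = pad_input_alt text
instance (text : String) (out : String × Int) : Decidable (Spec_pad_input text out) := by unfold Spec_pad_input; infer_instance

-- ===== CLAIM (what is proved, stated in full; the proofs are below) =====
def Claim_equal_pad_input : Prop := ∀ (text : String), Dom_pad_input text → Spec_pad_input text (pad_input text)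

-- ===== LEMMAS AND PROOFS =====

-- the two per-char encoders agree below 128 (all Dom characters)
theorem pvEnc_eq_of_lt (n : Nat) (h : n < 128) : pvZfill8 (pvBin n) = pvFmt08b n := by
  revert h; revert n; decide

theorem pvEnc_eq_of_dom (c : Char) (h : pvDomChar c = true) :
    pvZfill8 (pvBin c.toNat) = pvFmt08b c.toNat := by
  apply pvEnc_eq_of_lt
  simp [pvDomChar] at h
  omega

-- the while loop equals the closed form
theorem pvPadLoop_eq (b : List Char) (p : Int) :
    pvPadLoop b p =
      (b ++ List.replicate ((128 - b.length % 128) % 128) '0',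
       p + (((128 - b.length % 128) % 128 : Nat) : Int)) := by
  fun_induction pvPadLoop b p with
  | case1 b p h =>
      rw [h]
      simp
  | case2 b p h ih =>
      rw [ih]
      have hk : (128 - b.length % 128) % 128 =
          ((128 - (b ++ ['0']).length % 128) % 128) + 1 := by
        simp only [List.length_append, List.length_cons, List.length_nil]
        omega
      rw [hk, List.replicate_succ]
      simp only [Prod.mk.injEq]
      refine ⟨by simp [List.append_assoc], by push_cast; ring⟩

-- ===== VERDICT (by name: the statement is the Claim_ definition above) =====
theorem pad_input_spec : Claim_equal_pad_input := by
  intro text hdom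
  unfold Spec_pad_input pad_input pad_input_alt
  have hmap : pv_str_to_bin text.toList =
      (text.toList.map (fun c => pvFmt08b c.toNat)).flatten := by
    unfold pv_str_to_bin
    rw [PySem.List.foldl_append_singleton_eq_map]
    congr 1
    apply List.map_congr_left
    intro c hc
    apply pvEnc_eq_of_dom
    have : pvDomStr text = true := hdom
    simp [pvDomStr, List.all_eq_true] at this
    exact this c hc
  simp only [hmap]
  set b := (text.toList.map (fun c => pvFmt08b c.toNat)).flatten with hb
  by_cases h0 : b.length % 128 = 0
  · simp [h0]
  · simp only [h0, ne_eq, not_false_iff, if_true]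
    rw [pvPadLoop_eq]
    simp
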